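-- pv_equiv track=rewrite | github.com/piotrhelm/NESTFUL | data_v2/executable_functions/py_code_file_3298.py | validate_curly_braces
-- ===== SOURCE A (Python) =====
-- from typing import List
--
-- def validate_curly_braces(string: str) -> bool:
--
--     """Validates if an input string has matching curly braces.
--
--
--
--     Args:
--
--         string: The input string to validate.
--
--
--
--     Returns:
--
--         True if the string has matching curly braces, False otherwise.
--
--
--
--     Raises:
--
--         Exception: If the string has unmatched curly braces.
--
--     """
--
--     stack: List[str] = []
--
--
--
--     for character in string:
--
--         if character == '{':
--
--             stack.append(character)
--
--         elif character == '}':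
--
--             if len(stack) == 0:
--
--                 return False
--
--             elif stack[-1] != '{':
--
--                 raise Exception("Unmatched curly braces")
--
--             else:
--
--                 stack.pop()
--
--     if len(stack) == 0:
--
--         return True
--
--     else:
--
--         return False
-- ===== SOURCE B (Python) =====
-- def validate_curly_braces(string: str) -> bool:
--     """Prefix-balance formulation: record the running brace balance after each
--     character; the string is valid iff no prefix balance goes negative and the
--     final balance is zero."""
--     balances = []
--     b = 0
--     for c in string:
--         b += (c == '{') - (c == '}')
--         balances.append(b)
--     return all(x >= 0 for x in balances) and b == 0
-- ===== Notes on version B (the rewrite author's own statement) =====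
-- stated objective: alternative
-- what changed: Replaced the early-return stack scan (append '{' / pop on '}', return False mid-loop on an unmatched closer) with a two-phase prefix-balance formulation: one branch-free pass records the running balance after every character, then the string is valid iff no recorded balance is negative and the final balance is zero; A's unreachable raise branch disappears.
import Mathlib
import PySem

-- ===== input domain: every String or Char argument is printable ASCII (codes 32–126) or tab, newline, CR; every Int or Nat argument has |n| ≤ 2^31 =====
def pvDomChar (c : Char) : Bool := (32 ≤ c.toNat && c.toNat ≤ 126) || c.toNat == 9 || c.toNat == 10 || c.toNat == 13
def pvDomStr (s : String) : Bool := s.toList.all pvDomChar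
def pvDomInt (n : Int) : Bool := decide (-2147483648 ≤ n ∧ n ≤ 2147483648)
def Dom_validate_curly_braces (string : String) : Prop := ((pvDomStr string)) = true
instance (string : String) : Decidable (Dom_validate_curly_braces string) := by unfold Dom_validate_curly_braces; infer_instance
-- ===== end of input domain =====

-- B replaces A's early-return stack scan with a branch-free prefix-balance pass
-- followed by an all-nonnegative + final-zero check (alternative decomposition).

-- ===== PORT A =====
-- A's for-loop with the stack accumulator (head = Python's stack[-1], the top).
-- The 'raise' branch (stack top ≠ '{') is unreachable since only '{' is ever
-- pushed; the port keeps the branch and its value there is irrelevant (false).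
def pvGoA : List Char → List Char → Bool
  | [], stack => stack.length == 0
  | c :: cs, stack =>
    if c = '{' then pvGoA cs (c :: stack)
    else if c = '}' then
      if stack.length == 0 then false
      else if stack.head? ≠ some '{' then false  -- Python: raise Exception (unreachable)
      else pvGoA cs stack.tail
    else pvGoA cs stack

def validate_curly_braces (string : String) : Bool := pvGoA string.toList []

-- ===== PORT B =====
-- the loop of Source B: state = (balances list built so far, current balance b)
def pvStepB (st : List Int × Int) (c : Char) : List Int × Int :=
  let b := st.2 + ((if c = '{' then (1 : Int) else 0) - (if c = '}' then (1 : Int) else 0))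
  (st.1 ++ [b], b)

def validate_curly_braces_alt (string : String) : Bool :=
  let st := string.toList.foldl pvStepB ([], 0)
  st.1.all (fun x => 0 ≤ x) && st.2 == 0

-- ===== PRECONDITION & SPEC =====
def Spec_validate_curly_braces (string : String) (out : Bool) : Prop := out = validate_curly_braces_alt string
instance (string : String) (out : Bool) : Decidable (Spec_validate_curly_braces string out) := by unfold Spec_validate_curly_braces; infer_instance

-- ===== CLAIM (what is proved, stated in full; the proofs are below) =====
def Claim_equal_validate_curly_braces : Prop := ∀ (string : String), Dom_validate_curly_braces string → Spec_validate_curly_braces string (validate_curly_braces string)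

-- ===== LEMMAS AND PROOFS =====

-- running-balance list starting from balance d (pure form of B's loop)
def pvBal : List Char → Int → List Int
  | [], _ => []
  | c :: cs, d =>
    let d' := d + ((if c = '{' then (1 : Int) else 0) - (if c = '}' then (1 : Int) else 0))
    d' :: pvBal cs d'

-- final balance
def pvFin : List Char → Int → Int
  | [], d => d
  | c :: cs, d =>
    pvFin cs (d + ((if c = '{' then (1 : Int) else 0) - (if c = '}' then (1 : Int) else 0)))

theorem pvFoldB_eq (cs : List Char) : ∀ (acc : List Int) (d : Int),
    cs.foldl pvStepB (acc, d) = (acc ++ pvBal cs d, pvFin cs d) := by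
  induction cs with
  | nil => intro acc d; simp [pvBal, pvFin]
  | cons c cs ih =>
    intro acc d
    simp only [List.foldl, pvStepB, pvBal, pvFin]
    rw [ih]
    simp

-- intermediate: A's stack scan as an integer counter (proof device only)
def pvOk : List Char → Int → Bool
  | [], d => d == 0
  | c :: cs, d =>
    if c = '{' then pvOk cs (d + 1)
    else if c = '}' then (if d == 0 then false else pvOk cs (d - 1))
    else pvOk cs d

theorem pvGoA_eq_ok (cs : List Char) : ∀ (d : Nat),
    pvGoA cs (List.replicate d '{') = pvOk cs (d : Int) := by
  induction cs with
  | nil => intro d; simp [pvGoA, pvOk]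
  | cons c cs ih =>
    intro d
    by_cases hc : c = '{'
    · subst hc
      have h1 : pvGoA ('{' :: cs) (List.replicate d '{') =
          pvGoA cs (List.replicate (d + 1) '{') := by
        simp [pvGoA, List.replicate_succ]
      have h2 : pvOk ('{' :: cs) (d : Int) = pvOk cs ((d : Int) + 1) := by
        simp [pvOk]
      rw [h1, ih (d + 1), h2]
      congr 1
    · by_cases hc2 : c = '}'
      · subst hc2
        cases d with
        | zero => simp [pvGoA, pvOk, hc]
        | succ n =>
          have e1 : pvGoA ('}' :: cs) (List.replicate (n + 1) '{') =
              pvGoA cs (List.replicate n '{') := by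
            show (if ('}' : Char) = '{' then pvGoA cs ('}' :: List.replicate (n + 1) '{')
              else if ('}' : Char) = '}' then
                (if (List.replicate (n + 1) '{').length == 0 then false
                 else if (List.replicate (n + 1) '{').head? ≠ some '{' then false
                 else pvGoA cs (List.replicate (n + 1) '{').tail)
              else pvGoA cs (List.replicate (n + 1) '{')) = pvGoA cs (List.replicate n '{')
            rw [if_neg (by decide : ¬('}' : Char) = '{'), if_pos (rfl : ('}' : Char) = '}'),
              if_neg (show ¬(((List.replicate (n + 1) '{').length == 0) = true) by simp),
              if_neg (show ¬((List.replicate (n + 1) '{').head? ≠ some '{') by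
                simp [List.replicate_succ]),
              show (List.replicate (n + 1) '{').tail = List.replicate n '{' by
                simp [List.replicate_succ]]
          have e2 : pvOk ('}' :: cs) ((n + 1 : Nat) : Int) = pvOk cs ((n : Nat) : Int) := by
            show (if ('}' : Char) = '{' then pvOk cs (((n + 1 : Nat) : Int) + 1)
              else if ('}' : Char) = '}' then
                (if ((n + 1 : Nat) : Int) == 0 then false
                 else pvOk cs (((n + 1 : Nat) : Int) - 1))
              else pvOk cs ((n + 1 : Nat) : Int)) = pvOk cs ((n : Nat) : Int)
            rw [if_neg (by decide : ¬('}' : Char) = '{'), if_pos (rfl : ('}' : Char) = '}'),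
              if_neg (show ¬((((n + 1 : Nat) : Int) == 0) = true) by simp only [beq_iff_eq]; push_cast; omega),
              show ((n + 1 : Nat) : Int) - 1 = ((n : Nat) : Int) by push_cast; ring]
          rw [e1, ih n, e2]
      · have h1 : pvGoA (c :: cs) (List.replicate d '{') =
            pvGoA cs (List.replicate d '{') := by
          simp [pvGoA, hc, hc2]
        rw [h1, ih d]
        simp [pvOk, hc, hc2]

theorem pvOk_eq_bal (cs : List Char) : ∀ (d : Int), 0 ≤ d →
    pvOk cs d = (((pvBal cs d).all (fun x => 0 ≤ x)) && (pvFin cs d == 0)) := by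
  induction cs with
  | nil => intro d _; simp [pvOk, pvBal, pvFin]
  | cons c cs ih =>
    intro d hd
    by_cases hc : c = '{'
    · have hδ : d + ((if c = '{' then (1 : Int) else 0)
          - (if c = '}' then (1 : Int) else 0)) = d + 1 := by simp [hc]
      simp only [pvOk, pvBal, pvFin, hc, if_pos, hδ, ite_true]
      rw [ih (d + 1) (by omega)]
      have h1 : decide ((0 : Int) ≤ d + 1) = true := by simp; omega
      simp [List.all_cons, h1]
    · by_cases hc2 : c = '}'
      · have hδ : d + ((if c = '{' then (1 : Int) else 0)
            - (if c = '}' then (1 : Int) else 0)) = d - 1 := by simp [hc, hc2]; ring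
        simp only [pvOk, pvBal, pvFin, hc, hc2, ite_true, ite_false, hδ]
        by_cases h0 : d = 0
        · subst h0
          have h1 : decide ((0 : Int) ≤ 0 - 1) = false := by decide
          simp [List.all_cons, h1]
        · rw [if_neg (by simpa using h0), ih (d - 1) (by omega)]
          simp [List.all_cons, h0, show d + -1 = d - 1 from by ring,
            show (1 : Int) ≤ d from by omega]
      · have hδ : d + ((if c = '{' then (1 : Int) else 0)
            - (if c = '}' then (1 : Int) else 0)) = d := by simp [hc, hc2]
        simp only [pvOk, pvBal, pvFin, hc, hc2, ite_false, hδ]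
        rw [ih d hd]
        have h1 : decide ((0 : Int) ≤ d) = true := by simpa using hd
        simp [List.all_cons, h1]

-- ===== VERDICT (by name: the statement is the Claim_ definition above) =====
theorem validate_curly_braces_spec : Claim_equal_validate_curly_braces := by
  intro s _
  unfold Spec_validate_curly_braces validate_curly_braces validate_curly_braces_alt
  rw [pvFoldB_eq]
  have h : pvGoA s.toList [] = pvOk s.toList 0 := pvGoA_eq_ok s.toList 0
  rw [h, pvOk_eq_bal s.toList 0 le_rfl]
  simp
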